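-- pv_equiv track=rewrite | github.com/jeongminllee/ProgrammersCodeTest | 프로그래머스/1/133499. 옹알이 （2）/옹알이 （2）.py | solution
-- ===== SOURCE A (Python) =====
-- def solution(babbling):
--     answer = 0
--     lst = ["aya", "ye", "woo", "ma"]
--
--     for word in babbling :
--         val = True
--         prev = ""
--         i = 0
--
--         while i < len(word) :
--             flag = False
--             for speak in lst :
--                 if word[i : i + len(speak)] == speak and speak != prev :
--                     flag = True
--                     prev = speak
--                     i += len(speak)
--                     break
--             if not flag :
--                 val = False
--                 break
--
--         if val :
--             answer += 1
--
--     return answer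
-- ===== SOURCE B (Python) =====
-- # B: single char-by-char automaton pass per word (state = pending token suffix + previous token),
-- # instead of A's index-advancing slice-comparison against the token list.
-- _TOKENS = {'a': 'aya', 'y': 'ye', 'w': 'woo', 'm': 'ma'}
--
-- def solution(babbling):
--     count = 0
--     for word in babbling:
--         pending = ''
--         prev = ''
--         ok = True
--         for ch in word:
--             if pending:
--                 if ch == pending[0]:
--                     pending = pending[1:]
--                 else:
--                     ok = False
--                     break
--             else:
--                 tok = _TOKENS.get(ch)
--                 if tok is None or tok == prev:
--                     ok = False
--                     break
--                 prev = tok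
--                 pending = tok[1:]
--         if ok and pending == '':
--             count += 1
--     return count
-- ===== Notes on version B (the rewrite author's own statement) =====
-- stated objective: faster
-- what changed: B replaces A's index-advancing greedy parse that compares word[i:i+len] slices against the token list at each position by a single character-by-character automaton pass per word, whose state is the pending suffix of the current token (looked up by its first character) plus the previous token; this removes the per-position slice allocations and token-list scan.
import Mathlib
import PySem

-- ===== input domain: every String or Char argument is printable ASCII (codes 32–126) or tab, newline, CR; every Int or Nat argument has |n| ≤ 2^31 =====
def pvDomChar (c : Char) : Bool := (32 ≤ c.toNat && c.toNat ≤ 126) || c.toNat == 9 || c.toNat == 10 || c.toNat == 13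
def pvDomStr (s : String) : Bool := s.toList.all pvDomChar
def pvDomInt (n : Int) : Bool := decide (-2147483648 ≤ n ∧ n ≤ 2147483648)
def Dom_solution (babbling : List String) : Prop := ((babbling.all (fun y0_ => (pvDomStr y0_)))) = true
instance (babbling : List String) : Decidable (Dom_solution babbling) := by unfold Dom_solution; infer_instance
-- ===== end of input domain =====

-- B replaces A's index-advancing greedy slice-comparison parse by a single char-by-char
-- automaton pass per word (objective: alternative).

-- ===== PORT A =====
-- A's inner while loop: index i advances by the length of the first token of
-- ["aya","ye","woo","ma"] that matches word[i:i+len(speak)] and differs from prev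
-- (the for/break over lst written out as the if-chain, in list order); word as List Char.
def aLoop (w : List Char) (prev : List Char) (i : Nat) : Bool :=
  if h : i < w.length then
    if PySem.List.slice w (some (i : Int)) (some ((i : Int) + 3)) = ['a','y','a'] ∧ prev ≠ ['a','y','a'] then
      aLoop w ['a','y','a'] (i + 3)
    else if PySem.List.slice w (some (i : Int)) (some ((i : Int) + 2)) = ['y','e'] ∧ prev ≠ ['y','e'] then
      aLoop w ['y','e'] (i + 2)
    else if PySem.List.slice w (some (i : Int)) (some ((i : Int) + 3)) = ['w','o','o'] ∧ prev ≠ ['w','o','o'] then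
      aLoop w ['w','o','o'] (i + 3)
    else if PySem.List.slice w (some (i : Int)) (some ((i : Int) + 2)) = ['m','a'] ∧ prev ≠ ['m','a'] then
      aLoop w ['m','a'] (i + 2)
    else false
  else true
termination_by w.length - i

def solution (babbling : List String) : Int :=
  babbling.foldl (fun answer word => if aLoop word.toList [] 0 then answer + 1 else answer) 0

-- ===== PORT B =====
-- B's inner for loop over the characters: pending = rest of the token being consumed,
-- prev = last completed token (the break = returning false); at the end the word is
-- valid iff the loop never broke and pending is empty.
def bScan : List Char → List Char → List Char → Bool
  | [], pending, _ => pending.isEmpty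
  | c :: rest, p :: ps, prev => if c = p then bScan rest ps prev else false
  | c :: rest, [], prev =>
      match PySem.Dict.get? (PySem.Dict.ofList
          [('a', ['a','y','a']), ('y', ['y','e']), ('w', ['w','o','o']), ('m', ['m','a'])]) c with
      | some tok => if tok = prev then false else bScan rest tok.tail tok
      | none => false

def solution_alt (babbling : List String) : Int :=
  babbling.foldl (fun count word => if bScan word.toList [] [] then count + 1 else count) 0

-- ===== PRECONDITION & SPEC =====
def Spec_solution (babbling : List String) (out : Int) : Prop := out = solution_alt babbling
instance (babbling : List String) (out : Int) : Decidable (Spec_solution babbling out) := by unfold Spec_solution; infer_instance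

-- ===== CLAIM (what is proved, stated in full; the proofs are below) =====
def Claim_equal_solution : Prop := ∀ (babbling : List String), Dom_solution babbling → Spec_solution babbling (solution babbling)

-- ===== LEMMAS AND PROOFS =====

-- A's loop phrased on the suffix w.drop i (proof helper).
def aVal (t : List Char) (prev : List Char) : Bool :=
  if ht : t = [] then true
  else
    if t.take 3 = ['a','y','a'] ∧ prev ≠ ['a','y','a'] then aVal (t.drop 3) ['a','y','a']
    else if t.take 2 = ['y','e'] ∧ prev ≠ ['y','e'] then aVal (t.drop 2) ['y','e']
    else if t.take 3 = ['w','o','o'] ∧ prev ≠ ['w','o','o'] then aVal (t.drop 3) ['w','o','o']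
    else if t.take 2 = ['m','a'] ∧ prev ≠ ['m','a'] then aVal (t.drop 2) ['m','a']
    else false
termination_by t.length
decreasing_by
  all_goals
    have : t ≠ [] := ht
    have h0 : 0 < t.length := List.length_pos_iff.mpr this
    simp [List.length_drop]; omega

theorem slice3 (w : List Char) (i : Nat) :
    PySem.List.slice w (some (i : Int)) (some ((i : Int) + 3)) = (w.drop i).take 3 := by
  have h : ((i : Int) + 3) = (((i + 3 : Nat)) : Int) := by push_cast; ring
  rw [h, PySem.List.slice_natCast]
  simp

theorem slice2 (w : List Char) (i : Nat) :
    PySem.List.slice w (some (i : Int)) (some ((i : Int) + 2)) = (w.drop i).take 2 := by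
  have h : ((i : Int) + 2) = (((i + 2 : Nat)) : Int) := by push_cast; ring
  rw [h, PySem.List.slice_natCast]
  simp

theorem drop_ne_nil_of_lt (w : List Char) (i : Nat) (h : i < w.length) : w.drop i ≠ [] := by
  intro he; have := congrArg List.length he; simp at this; omega

theorem aLoop_eq_aVal (w : List Char) : ∀ i prev, aLoop w prev i = aVal (w.drop i) prev := by
  intro i prev
  fun_induction aLoop w prev i with
  | case1 prev i h hc ih =>
    rw [aVal, dif_neg (drop_ne_nil_of_lt w i h)]
    rw [if_pos (by rw [← slice3]; exact hc)]
    rw [ih, List.drop_drop]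
  | case2 prev i h h1 hc ih =>
    rw [aVal, dif_neg (drop_ne_nil_of_lt w i h)]
    rw [if_neg (by rw [← slice3]; exact h1), if_pos (by rw [← slice2]; exact hc)]
    rw [ih, List.drop_drop]
  | case3 prev i h h1 h2 hc ih =>
    rw [aVal, dif_neg (drop_ne_nil_of_lt w i h)]
    rw [if_neg (by rw [← slice3]; exact h1), if_neg (by rw [← slice2]; exact h2),
        if_pos (by rw [← slice3]; exact hc)]
    rw [ih, List.drop_drop]
  | case4 prev i h h1 h2 h3 hc ih =>
    rw [aVal, dif_neg (drop_ne_nil_of_lt w i h)]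
    rw [if_neg (by rw [← slice3]; exact h1), if_neg (by rw [← slice2]; exact h2),
        if_neg (by rw [← slice3]; exact h3), if_pos (by rw [← slice2]; exact hc)]
    rw [ih, List.drop_drop]
  | case5 prev i h h1 h2 h3 h4 =>
    rw [aVal, dif_neg (drop_ne_nil_of_lt w i h)]
    rw [if_neg (by rw [← slice3]; exact h1), if_neg (by rw [← slice2]; exact h2),
        if_neg (by rw [← slice3]; exact h3), if_neg (by rw [← slice2]; exact h4)]
  | case6 prev i h =>
    have : w.drop i = [] := by
      apply List.drop_eq_nil_of_le; omega
    rw [aVal, dif_pos this]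


theorem bScan_pending_false : ∀ (p t prev : List Char), t.take p.length ≠ p → bScan t p prev = false := by
  intro p
  induction p with
  | nil => intro t prev h; simp at h
  | cons q qs ih =>
    intro t prev h
    cases t with
    | nil => simp [bScan]
    | cons c rest =>
      by_cases hc : c = q
      · subst hc
        simp [bScan]
        exact ih rest _ (by simpa using h)
      · simp [bScan, hc]


theorem getA : PySem.Dict.get? (PySem.Dict.ofList
    [('a', ['a','y','a']), ('y', ['y','e']), ('w', ['w','o','o']), ('m', ['m','a'])]) 'a'
    = some ['a','y','a'] := by decide
theorem getY : PySem.Dict.get? (PySem.Dict.ofList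
    [('a', ['a','y','a']), ('y', ['y','e']), ('w', ['w','o','o']), ('m', ['m','a'])]) 'y'
    = some ['y','e'] := by decide
theorem getW : PySem.Dict.get? (PySem.Dict.ofList
    [('a', ['a','y','a']), ('y', ['y','e']), ('w', ['w','o','o']), ('m', ['m','a'])]) 'w'
    = some ['w','o','o'] := by decide
theorem getM : PySem.Dict.get? (PySem.Dict.ofList
    [('a', ['a','y','a']), ('y', ['y','e']), ('w', ['w','o','o']), ('m', ['m','a'])]) 'm'
    = some ['m','a'] := by decide

theorem getNone (c : Char) (ha : c ≠ 'a') (hy : c ≠ 'y') (hw : c ≠ 'w') (hm : c ≠ 'm') :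
    PySem.Dict.get? (PySem.Dict.ofList
    [('a', ['a','y','a']), ('y', ['y','e']), ('w', ['w','o','o']), ('m', ['m','a'])]) c
    = none := by
  have h : PySem.Dict.ofList
      [('a', ['a','y','a']), ('y', ['y','e']), ('w', ['w','o','o']), ('m', ['m','a'])]
      = PySem.Dict.mk [('a', ['a','y','a']), ('y', ['y','e']), ('w', ['w','o','o']), ('m', ['m','a'])] := by
    decide
  rw [h]
  simp [PySem.Dict.get?_mk_cons, Ne.symm ha, Ne.symm hy, Ne.symm hw, Ne.symm hm]
  rfl

theorem aVal_eq_bScan : ∀ (t prev : List Char), aVal t prev = bScan t [] prev := by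
  intro t prev
  fun_induction aVal t prev with
  | case1 prev => simp [bScan]
  | case2 t prev ht hc ih =>
    have hts : t = 'a'::'y'::'a'::(t.drop 3) := by
      conv_lhs => rw [← List.take_append_drop 3 t, hc.1]
      rfl
    rw [ih]
    conv_rhs => rw [hts]
    simp [bScan, getA, Ne.symm hc.2]
  | case3 t prev ht h1 hc ih =>
    have hts : t = 'y'::'e'::(t.drop 2) := by
      conv_lhs => rw [← List.take_append_drop 2 t, hc.1]
      rfl
    rw [ih]
    conv_rhs => rw [hts]
    simp [bScan, getY, Ne.symm hc.2]
  | case4 t prev ht h1 h2 hc ih =>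
    have hts : t = 'w'::'o'::'o'::(t.drop 3) := by
      conv_lhs => rw [← List.take_append_drop 3 t, hc.1]
      rfl
    rw [ih]
    conv_rhs => rw [hts]
    simp [bScan, getW, Ne.symm hc.2]
  | case5 t prev ht h1 h2 h3 hc ih =>
    have hts : t = 'm'::'a'::(t.drop 2) := by
      conv_lhs => rw [← List.take_append_drop 2 t, hc.1]
      rfl
    rw [ih]
    conv_rhs => rw [hts]
    simp [bScan, getM, Ne.symm hc.2]
  | case6 t prev ht h1 h2 h3 h4 =>
    cases t with
    | nil => exact absurd rfl ht
    | cons c rest =>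
      by_cases ha : c = 'a'
      · subst ha
        by_cases hp : prev = ['a','y','a']
        · simp [bScan, getA, hp]
        · have hta : rest.take 2 ≠ ['y','a'] := by
            intro he
            exact h1 ⟨by rw [show List.take 3 ('a'::rest) = 'a' :: rest.take 2 from rfl, he], hp⟩
          have hf := bScan_pending_false ['y','a'] rest ['a','y','a'] (by simpa using hta)
          simp [bScan, getA, Ne.symm hp, hf]
      · by_cases hy : c = 'y'
        · subst hy
          by_cases hp : prev = ['y','e']
          · simp [bScan, getY, hp]
          · have hta : rest.take 1 ≠ ['e'] := by
              intro he
              exact h2 ⟨by rw [show List.take 2 ('y'::rest) = 'y' :: rest.take 1 from rfl, he], hp⟩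
            have hf := bScan_pending_false ['e'] rest ['y','e'] (by simpa using hta)
            simp [bScan, getY, Ne.symm hp, hf]
        · by_cases hw : c = 'w'
          · subst hw
            by_cases hp : prev = ['w','o','o']
            · simp [bScan, getW, hp]
            · have hta : rest.take 2 ≠ ['o','o'] := by
                intro he
                exact h3 ⟨by rw [show List.take 3 ('w'::rest) = 'w' :: rest.take 2 from rfl, he], hp⟩
              have hf := bScan_pending_false ['o','o'] rest ['w','o','o'] (by simpa using hta)
              simp [bScan, getW, Ne.symm hp, hf]
          · by_cases hm : c = 'm'
            · subst hm
              by_cases hp : prev = ['m','a']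
              · simp [bScan, getM, hp]
              · have hta : rest.take 1 ≠ ['a'] := by
                  intro he
                  exact h4 ⟨by rw [show List.take 2 ('m'::rest) = 'm' :: rest.take 1 from rfl, he], hp⟩
                have hf := bScan_pending_false ['a'] rest ['m','a'] (by simpa using hta)
                simp [bScan, getM, Ne.symm hp, hf]
            · simp [bScan, getNone c ha hy hw hm]

-- ===== VERDICT (by name: the statement is the Claim_ definition above) =====
theorem solution_spec : Claim_equal_solution := by
  intro babbling _
  unfold Spec_solution solution solution_alt
  have h : ∀ (w : String), aLoop w.toList [] 0 = bScan w.toList [] [] := by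
    intro w
    rw [aLoop_eq_aVal w.toList 0 [], List.drop_zero, aVal_eq_bScan]
  simp only [h]
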